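-- pv_equiv track=rewrite | github.com/joethomas9/AoC24 | day10.py | check_trail
-- ===== SOURCE A (Python) =====
-- def check_trail(pos, trail, grid):
--     directions = [(-1, 0), (1, 0), (0, 1), (0, -1)]
--     if grid[pos] == '9':
--         return [trail]
--     return [
--         subtrail
--         for dx, dy in directions
--         if (new_pos := (pos[0] + dx, pos[1] + dy)) in grid and int(grid[new_pos]) - int(grid[pos]) == 1
--         for subtrail in check_trail(new_pos, trail + [new_pos], grid)
--     ]
-- ===== SOURCE B (Python) =====
-- def check_trail(pos, trail, grid):
--     directions = [(-1, 0), (1, 0), (0, 1), (0, -1)]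
--     results = []
--     stack = [(pos, trail)]
--     while stack:
--         p, t = stack.pop()
--         if grid[p] == '9':
--             results.append(t)
--         else:
--             for dx, dy in reversed(directions):
--                 new_pos = (p[0] + dx, p[1] + dy)
--                 if new_pos in grid and int(grid[new_pos]) - int(grid[p]) == 1:
--                     stack.append((new_pos, t + [new_pos]))
--     return results
-- ===== Notes on version B (the rewrite author's own statement) =====
-- stated objective: alternative
-- what changed: A's recursive pre-order DFS is replaced by an iterative DFS over an explicit stack of (pos, trail) pairs, pushing ascending neighbours in reversed direction order so pop order reproduces A's exact output order.
import Mathlib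
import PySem

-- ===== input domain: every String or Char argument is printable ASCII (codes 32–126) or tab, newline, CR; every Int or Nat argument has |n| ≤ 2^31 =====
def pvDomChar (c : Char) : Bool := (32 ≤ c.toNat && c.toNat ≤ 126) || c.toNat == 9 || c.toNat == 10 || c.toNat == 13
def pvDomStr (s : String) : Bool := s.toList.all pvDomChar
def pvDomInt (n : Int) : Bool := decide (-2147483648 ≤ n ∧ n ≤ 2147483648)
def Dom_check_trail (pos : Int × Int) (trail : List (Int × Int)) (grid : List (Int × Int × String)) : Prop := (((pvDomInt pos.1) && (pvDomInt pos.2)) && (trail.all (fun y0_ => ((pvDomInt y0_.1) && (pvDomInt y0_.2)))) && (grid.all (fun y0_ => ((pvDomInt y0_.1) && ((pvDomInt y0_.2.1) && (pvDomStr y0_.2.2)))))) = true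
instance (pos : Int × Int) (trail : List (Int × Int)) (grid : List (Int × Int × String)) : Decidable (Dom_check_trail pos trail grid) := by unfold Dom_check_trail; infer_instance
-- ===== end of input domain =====

-- B replaces A's recursive DFS by an explicit-stack iteration (same pre-order, neighbours pushed
-- in reversed direction order); objective: alternative decomposition, same cost, same return value.

-- shared helpers: dict[(x,y) -> str] as assoc list, first-match lookup (= Python dict semantics)
def pvLookup (grid : List (Int × Int × String)) (p : Int × Int) : Option String :=
  match grid with
  | [] => none
  | (x, y, s) :: rest => if x = p.1 ∧ y = p.2 then some s else pvLookup rest p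

-- grid[p]; "" only where Python raises KeyError (excluded by Pre_)
def pvCell (grid : List (Int × Int × String)) (p : Int × Int) : String :=
  (pvLookup grid p).getD ""

-- int(grid[p]); 0 only where Python raises (excluded by Pre_)
def pvCellInt (grid : List (Int × Int × String)) (p : Int × Int) : Int :=
  (PySem.Int.ofStr? (pvCell grid p)).getD 0

def pvDirs : List (Int × Int) := [(-1, 0), (1, 0), (0, 1), (0, -1)]

-- ===== PORT A =====
-- fuel is a totality guard only: on Pre_ inputs heights rise by 1 along distinct keys,
-- so recursion depth ≤ grid.length and fuel grid.length+1 is never exhausted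
def checkA (grid : List (Int × Int × String)) : Nat → (Int × Int) → List (Int × Int) → List (List (Int × Int))
  | 0, _, _ => []
  | fuel + 1, pos, trail =>
    if pvCell grid pos = "9" then [trail]
    else pvDirs.flatMap (fun d =>
      let np := (pos.1 + d.1, pos.2 + d.2)
      if (pvLookup grid np).isSome && (pvCellInt grid np - pvCellInt grid pos == 1)
      then checkA grid fuel np (trail ++ [np]) else [])

def check_trail (pos : Int × Int) (trail : List (Int × Int)) (grid : List (Int × Int × String)) : List (List (Int × Int)) :=
  checkA grid (grid.length + 1) pos trail

-- ===== PORT B =====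
-- the iterative DFS: stack of (entry-fuel, pos, trail), top = head; pop, emit on '9',
-- else push ascending neighbours; the outer Nat is a step-count totality guard only
def loopB (grid : List (Int × Int × String)) : Nat → List (Nat × (Int × Int) × List (Int × Int)) → List (List (Int × Int)) → List (List (Int × Int))
  | 0, _, acc => acc                                   -- step fuel guard, unreachable on Pre_ inputs
  | _ + 1, [], acc => acc
  | f + 1, (0, _, _) :: rest, acc => loopB grid f rest acc   -- entry fuel guard, unreachable on Pre_ inputs
  | f + 1, (fuel + 1, p, t) :: rest, acc =>
    if pvCell grid p = "9" then loopB grid f rest (acc ++ [t])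
    else
      let pushed := pvDirs.reverse.foldl (fun st (d : Int × Int) =>
          let np := (p.1 + d.1, p.2 + d.2)
          if (pvLookup grid np).isSome && (pvCellInt grid np - pvCellInt grid p == 1)
          then (fuel, np, t ++ [np]) :: st else st) []
      loopB grid f (pushed ++ rest) acc

def check_trail_alt (pos : Int × Int) (trail : List (Int × Int)) (grid : List (Int × Int × String)) : List (List (Int × Int)) :=
  loopB grid (5 ^ (grid.length + 2)) [(grid.length + 1, pos, trail)] []

-- ===== PRECONDITION & SPEC =====
-- closed-form helpers for Pre_: key membership, the four neighbour keys, int-parsability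
def pvIsKey (grid : List (Int × Int × String)) (q : Int × Int) : Bool :=
  grid.any (fun e => decide (e.1 = q.1 ∧ e.2.1 = q.2))
def pvNbr (x y : Int) : List (Int × Int) := [(x - 1, y), (x + 1, y), (x, y + 1), (x, y - 1)]
def pvIntOk (s : String) : Bool := (PySem.Int.ofStr? s).isSome

-- value parses and every in-grid neighbour's value parses (all the int() calls at this cell succeed)
def pvCellsOk (grid : List (Int × Int × String)) (e : Int × Int × String) : Bool :=
  pvIntOk e.2.2 && (pvNbr e.1 e.2.1).all (fun q =>
    grid.all (fun e' => !(decide (e'.1 = q.1 ∧ e'.2.1 = q.2)) || pvIntOk e'.2.2))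
-- some in-grid neighbour sits exactly 1 below this cell (a non-start cell can only be visited then)
def pvAsc (grid : List (Int × Int × String)) (e : Int × Int × String) : Bool :=
  (pvNbr e.1 e.2.1).any (fun q => grid.any (fun e' =>
    decide (e'.1 = q.1 ∧ e'.2.1 = q.2) && pvIntOk e'.2.2 && pvIntOk e.2.2 &&
    ((PySem.Int.ofStr? e.2.2).getD 0 - (PySem.Int.ofStr? e'.2.2).getD 0 == 1)))

-- Pre_ excludes the inputs on which Python raises: pos not a key of grid (KeyError), and
-- int-unparsable values at cells the programs may feed to int() — the start cell and its in-grid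
-- neighbours when the start cell is not '9' and has an in-grid neighbour, and likewise any non-'9'
-- cell that is locally ascending-reachable (an in-grid neighbour exactly 1 below it).  "Visited" is not a
-- closed-form condition, so this is slightly stronger than A's exact domain: it also excludes
-- some inputs where an unparsable value sits near an ascending cell the search never visits,
-- on which A still returns (see cites).
def Pre_check_trail (pos : Int × Int) (trail : List (Int × Int)) (grid : List (Int × Int × String)) : Prop :=
  pvIsKey grid pos = true ∧
  grid.all (fun e => !(decide (e.1 = pos.1 ∧ e.2.1 = pos.2)) || (e.2.2 == "9") ||
      !((pvNbr e.1 e.2.1).any (pvIsKey grid)) || pvCellsOk grid e) = true ∧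
  grid.all (fun e => (e.2.2 == "9") || !(pvAsc grid e) || pvCellsOk grid e) = true
instance (pos : Int × Int) (trail : List (Int × Int)) (grid : List (Int × Int × String)) : Decidable (Pre_check_trail pos trail grid) := by unfold Pre_check_trail; infer_instance

def pvWitness_check_trail : (Int × Int) × (List (Int × Int)) × (List (Int × Int × String)) :=
  ((0, 0), [], [(0, 0, "8"), (1, 0, "9")])

def Spec_check_trail (pos : Int × Int) (trail : List (Int × Int)) (grid : List (Int × Int × String)) (out : List (List (Int × Int))) : Prop := out = check_trail_alt pos trail grid
instance (pos : Int × Int) (trail : List (Int × Int)) (grid : List (Int × Int × String)) (out : List (List (Int × Int))) : Decidable (Spec_check_trail pos trail grid out) := by unfold Spec_check_trail; infer_instance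

-- ===== CLAIM (what is proved, stated in full; the proofs are below) =====
def Claim_equal_check_trail : Prop := ∀ (pos : Int × Int) (trail : List (Int × Int)) (grid : List (Int × Int × String)), Dom_check_trail pos trail grid → Pre_check_trail pos trail grid → Spec_check_trail pos trail grid (check_trail pos trail grid)

-- ===== LEMMAS AND PROOFS =====

lemma pvFlatMapFilterMap {α β γ : Type} (c : α → Bool) (f : α → β) (g : β → List γ) (l : List α) :
    ((l.filter c).map f).flatMap g = l.flatMap (fun x => if c x then g (f x) else []) := by
  induction l with
  | nil => rfl
  | cons x xs ih => by_cases h : c x = true <;> simp [h, ih]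

def pvWeight (stack : List (Nat × (Int × Int) × List (Int × Int))) : Nat :=
  (stack.map (fun e => 5 ^ e.1)).sum

lemma pvFoldlCons {α β : Type} (f : α → β) (c : α → Bool) (l : List α) :
    ∀ st : List β,
      l.foldl (fun st x => if c x then f x :: st else st) st
        = ((l.reverse.filter c).map f) ++ st := by
  induction l with
  | nil => intro st; simp
  | cons x xs ih =>
    intro st
    simp only [List.foldl_cons, List.reverse_cons, List.filter_append, List.map_append,
      List.append_assoc, ih]
    by_cases h : c x = true <;> simp [h]

lemma loopB_eq (grid : List (Int × Int × String)) :
    ∀ (f : Nat) (stack : List (Nat × (Int × Int) × List (Int × Int))) (acc : List (List (Int × Int))),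
      pvWeight stack < f →
      loopB grid f stack acc = acc ++ stack.flatMap (fun e => checkA grid e.1 e.2.1 e.2.2) := by
  intro f
  induction f with
  | zero => intro stack acc h; omega
  | succ f ih =>
    intro stack acc hw
    match stack with
    | [] => simp [loopB]
    | (0, a, b) :: rest =>
      simp only [pvWeight, List.map_cons, List.sum_cons, pow_zero] at hw
      simp only [loopB, List.flatMap_cons, checkA, List.nil_append]
      exact ih rest acc (by simpa [pvWeight] using by omega)
    | (fuel + 1, p, t) :: rest =>
      have hpos : 0 < 5 ^ fuel := Nat.pow_pos (by norm_num)
      have hw' : 5 ^ (fuel + 1) + pvWeight rest < f + 1 := by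
        simpa [pvWeight] using hw
      rw [loopB]
      by_cases h9 : pvCell grid p = "9"
      · rw [if_pos h9, ih rest (acc ++ [t]) (by omega)]
        simp [checkA, h9]
      · rw [if_neg h9]
        have hp : (pvDirs.reverse.foldl (fun st (d : Int × Int) =>
              let np := (p.1 + d.1, p.2 + d.2)
              if (pvLookup grid np).isSome && (pvCellInt grid np - pvCellInt grid p == 1)
              then (fuel, np, t ++ [np]) :: st else st) [] : List (Nat × (Int × Int) × List (Int × Int)))
            = (pvDirs.filter (fun d : Int × Int =>
                (pvLookup grid (p.1 + d.1, p.2 + d.2)).isSome &&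
                  (pvCellInt grid (p.1 + d.1, p.2 + d.2) - pvCellInt grid p == 1))).map
              (fun d : Int × Int => (fuel, (p.1 + d.1, p.2 + d.2), t ++ [(p.1 + d.1, p.2 + d.2)])) := by
          rw [pvFoldlCons]
          simp
        simp only [hp]
        have hlen : ((pvDirs.filter (fun d : Int × Int =>
            (pvLookup grid (p.1 + d.1, p.2 + d.2)).isSome &&
              (pvCellInt grid (p.1 + d.1, p.2 + d.2) - pvCellInt grid p == 1)))).length ≤ 4 := by
          have := List.length_filter_le (l := pvDirs) (p := (fun d : Int × Int =>
            (pvLookup grid (p.1 + d.1, p.2 + d.2)).isSome &&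
              (pvCellInt grid (p.1 + d.1, p.2 + d.2) - pvCellInt grid p == 1)))
          simpa [pvDirs] using this
        have hwp : pvWeight ((pvDirs.filter (fun d : Int × Int =>
            (pvLookup grid (p.1 + d.1, p.2 + d.2)).isSome &&
              (pvCellInt grid (p.1 + d.1, p.2 + d.2) - pvCellInt grid p == 1))).map
            (fun d : Int × Int => (fuel, (p.1 + d.1, p.2 + d.2), t ++ [(p.1 + d.1, p.2 + d.2)])) ++ rest)
            < f := by
          have h1 : ∀ (l : List (Int × Int)),
              ((l.map (fun d : Int × Int => (fuel, (p.1 + d.1, p.2 + d.2), t ++ [(p.1 + d.1, p.2 + d.2)]))).map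
                (fun e : Nat × (Int × Int) × List (Int × Int) => 5 ^ e.1)).sum = l.length * 5 ^ fuel := by
            intro l; induction l with
            | nil => simp
            | cons x xs ihx =>
              simp only [List.map_cons, List.sum_cons, ihx, List.length_cons]
              ring
          have h2 : (5 : Nat) ^ (fuel + 1) = 5 * 5 ^ fuel := by rw [pow_succ]; ring
          rw [h2] at hw'
          simp only [pvWeight] at hw'
          simp only [pvWeight, List.map_append, List.sum_append, h1]
          have h3 : ((pvDirs.filter (fun d : Int × Int =>
              (pvLookup grid (p.1 + d.1, p.2 + d.2)).isSome &&
                (pvCellInt grid (p.1 + d.1, p.2 + d.2) - pvCellInt grid p == 1)))).length * 5 ^ fuel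
              ≤ 4 * 5 ^ fuel := Nat.mul_le_mul_right _ hlen
          omega
        rw [ih _ acc hwp]
        rw [List.flatMap_append, List.flatMap_cons, pvFlatMapFilterMap]
        simp [checkA, h9]

-- ===== VERDICT (by name: the statement is the Claim_ definition above) =====
theorem check_trail_spec : Claim_equal_check_trail := by
  intro pos trail grid _ _
  unfold Spec_check_trail check_trail check_trail_alt
  rw [loopB_eq]
  · simp
  · have h : (5 : ℕ) ^ (grid.length + 1) < 5 ^ (grid.length + 2) :=
      Nat.pow_lt_pow_right (by norm_num) (by omega)
    simpa [pvWeight] using h
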